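-- pv_equiv track=rewrite | github.com/artkpv/code-dojo | hackerrank.com/challenges/bomber-man/pr.py | plant_explode
-- ===== SOURCE A (Python) =====
-- def plant_explode(field, rows, cols):
--     """
-- field:
-- 000
-- 010
-- 000
--
-- exploded:
-- 010
-- 111
-- 010
--
-- new field:
-- 101
-- 000
-- 101
--
--     """
--     exploded = [0]*rows
--     # create explosion field:
--     for i in range(rows):
--         exploded[i] |= field[i]  # bombs itself
--         if i > 0:
--             exploded[i] |= field[i-1]  # upper
--         if i < rows - 1:
--             exploded[i] |= field[i+1]  # lower
--         exploded[i] |= field[i] << 1  # left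
--         exploded[i] |= field[i] >> 1  # right
--         # now exploded[i] has 1 for exploded and 0 for not
--         # reverse (filled with bombs) and truncate:
--         exploded[i] &= 2**(cols)-1  # truncate
--         exploded[i] ^= 2**(cols)-1
--     return tuple(exploded)
-- ===== SOURCE B (Python) =====
-- def plant_explode(field, rows, cols):
--     def pack(bs):
--         # integer whose bit j is bs[j]
--         if not bs:
--             return 0
--         if len(bs) == 1:
--             return bs[0]
--         h = len(bs) // 2
--         return pack(bs[:h]) | (pack(bs[h:]) << h)
--     result = []
--     for i in range(rows):
--         f = field[i]
--         fu = field[i - 1] if i > 0 else 0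
--         fd = field[i + 1] if i < rows - 1 else 0
--         surv = []
--         for j in range(cols):
--             boom = ((f >> j) & 1) or ((fu >> j) & 1) or ((fd >> j) & 1) \
--                 or (j > 0 and (f >> (j - 1)) & 1) or ((f >> (j + 1)) & 1)
--             surv.append(0 if boom else 1)
--         result.append(pack(surv))
--     return tuple(result)
-- ===== Notes on version B (the rewrite author's own statement) =====
-- stated objective: alternative
-- what changed: A computes each output row bit-parallel, OR-ing whole row integers with their shifts and then mask-complementing; B decodes the grid per cell -- for each (i,j) it tests the five neighbour bits (i,j),(i-1,j),(i+1,j),(i,j-1),(i,j+1) with single-bit shifts, collects a 0/1 survivor list per row and assembles the row integer with a divide-and-conquer pack.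
import Mathlib
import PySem

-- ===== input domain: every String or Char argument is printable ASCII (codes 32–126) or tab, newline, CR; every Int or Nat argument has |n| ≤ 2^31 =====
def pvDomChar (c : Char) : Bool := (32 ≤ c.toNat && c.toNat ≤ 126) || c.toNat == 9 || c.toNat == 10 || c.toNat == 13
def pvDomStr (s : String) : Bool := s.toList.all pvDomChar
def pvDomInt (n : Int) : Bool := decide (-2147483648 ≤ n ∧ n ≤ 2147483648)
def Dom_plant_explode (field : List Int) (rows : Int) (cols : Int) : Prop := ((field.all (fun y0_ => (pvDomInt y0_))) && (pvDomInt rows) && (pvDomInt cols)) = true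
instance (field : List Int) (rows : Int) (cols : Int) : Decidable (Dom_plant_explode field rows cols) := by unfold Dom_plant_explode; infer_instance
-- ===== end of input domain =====

-- ===== PORT A =====
-- B re-implements A's bit-parallel row masking by an explicit per-cell neighbour scan (alternative decomposition, same cost class).
def plant_explode (field : List Int) (rows : Int) (cols : Int) : List Int :=
  (PySem.List.pyRange 0 rows 1).foldl
    (fun ex i =>
      let e0 := PySem.List.pyGetD ex i 0
      let e1 := PySem.Int.bor e0 (PySem.List.pyGetD field i 0)
      let e2 := if 0 < i then PySem.Int.bor e1 (PySem.List.pyGetD field (i - 1) 0) else e1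
      let e3 := if i < rows - 1 then PySem.Int.bor e2 (PySem.List.pyGetD field (i + 1) 0) else e2
      let e4 := PySem.Int.bor e3 ((PySem.List.pyGetD field i 0) <<< (1 : Nat))
      let e5 := PySem.Int.bor e4 ((PySem.List.pyGetD field i 0) >>> (1 : Nat))
      let e6 := PySem.Int.band e5 ((2 : Int) ^ cols.toNat - 1)
      let e7 := PySem.Int.bxor e6 ((2 : Int) ^ cols.toNat - 1)
      PySem.List.pySetD ex i e7)
    (List.replicate rows.toNat 0)

-- ===== PORT B =====
-- pack: integer whose bit j is bs[j]; Python slices bs[:h]/bs[h:] with 0 <= h <= len are exactly take/drop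
def pvPack (bs : List Int) : Int :=
  if h0 : bs = [] then 0
  else if h1 : bs.length = 1 then PySem.List.pyGetD bs 0 0
  else
    PySem.Int.bor (pvPack (bs.take (bs.length / 2)))
      ((pvPack (bs.drop (bs.length / 2))) <<< (bs.length / 2))
termination_by bs.length
decreasing_by
  · have := List.length_pos_of_ne_nil h0
    rw [List.length_take, Nat.min_eq_left (Nat.div_le_self _ _)]
    omega
  · have := List.length_pos_of_ne_nil h0
    rw [List.length_drop]
    omega

-- Python's `x or y` over the 0/1 ints `(f >> j) & 1` is truthiness: ported as the Bool `… == 1`;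
-- every shift amount j, j-1 (guarded by j > 0), j+1 is nonnegative since j ranges over range(cols).
def plant_explode_alt (field : List Int) (rows : Int) (cols : Int) : List Int :=
  (PySem.List.pyRange 0 rows 1).foldl
    (fun res i =>
      let f := PySem.List.pyGetD field i 0
      let fu := if 0 < i then PySem.List.pyGetD field (i - 1) 0 else 0
      let fd := if i < rows - 1 then PySem.List.pyGetD field (i + 1) 0 else 0
      let surv := (PySem.List.pyRange 0 cols 1).foldl
        (fun surv j =>
          let boom := (PySem.Int.band (f >>> j.toNat) 1 == 1)
            || (PySem.Int.band (fu >>> j.toNat) 1 == 1)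
            || (PySem.Int.band (fd >>> j.toNat) 1 == 1)
            || (decide (0 < j) && (PySem.Int.band (f >>> (j - 1).toNat) 1 == 1))
            || (PySem.Int.band (f >>> (j + 1).toNat) 1 == 1)
          surv ++ [if boom then (0 : Int) else 1])
        []
      res ++ [pvPack surv])
    []

-- ===== PRECONDITION & SPEC =====
-- Pre_: when 0 < rows, Python A raises TypeError if cols < 0 (2**cols is a float) and IndexError if
-- rows > len(field); when rows <= 0 the loop body never runs and A returns () unconditionally.
def Pre_plant_explode (field : List Int) (rows : Int) (cols : Int) : Prop :=
  0 < rows → (0 ≤ cols ∧ rows ≤ (field.length : Int))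
instance (field : List Int) (rows : Int) (cols : Int) : Decidable (Pre_plant_explode field rows cols) := by
  unfold Pre_plant_explode; infer_instance
def pvWitness_plant_explode : List Int × Int × Int := ([2, 0, 5], 3, 3)
def Spec_plant_explode (field : List Int) (rows : Int) (cols : Int) (out : List Int) : Prop := out = plant_explode_alt field rows cols
instance (field : List Int) (rows : Int) (cols : Int) (out : List Int) : Decidable (Spec_plant_explode field rows cols out) := by unfold Spec_plant_explode; infer_instance

-- ===== CLAIM (what is proved, stated in full; the proofs are below) =====
def Claim_equal_plant_explode : Prop := ∀ (field : List Int) (rows : Int) (cols : Int), Dom_plant_explode field rows cols → Pre_plant_explode field rows cols → Spec_plant_explode field rows cols (plant_explode field rows cols)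

-- ===== LEMMAS AND PROOFS =====

-- bits of a subtraction of a sub-mask: (m - (m &&& k)) has exactly m's bits that k lacks
theorem pv_sub_and_testBit (j : Nat) : ∀ (m k : Nat),
    (m - (m &&& k)).testBit j = (m.testBit j && !(k.testBit j)) := by
  induction j with
  | zero =>
    intro m k
    have hle : m &&& k ≤ m := Nat.and_le_left
    have h0 : ((m &&& k) % 2 = 1)  ↔  (m % 2 = 1  ∧  k % 2 = 1) := by
      have h := Nat.testBit_and m k 0
      rw [Nat.testBit_zero, Nat.testBit_zero, Nat.testBit_zero, ← Bool.decide_and,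
          decide_eq_decide] at h
      exact h
    have hdiv : (m &&& k) / 2 = (m / 2) &&& (k / 2) := Nat.and_div_two
    have hd2 : (m / 2) &&& (k / 2) ≤ m / 2 := Nat.and_le_left
    rw [Nat.testBit_zero, Nat.testBit_zero, Nat.testBit_zero, ← decide_not,
        ← Bool.decide_and, decide_eq_decide]
    omega
  | succ j ih =>
    intro m k
    have hle : m &&& k ≤ m := Nat.and_le_left
    have h0 : ((m &&& k) % 2 = 1)  ↔  (m % 2 = 1  ∧  k % 2 = 1) := by
      have h := Nat.testBit_and m k 0
      rw [Nat.testBit_zero, Nat.testBit_zero, Nat.testBit_zero, ← Bool.decide_and,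
          decide_eq_decide] at h
      exact h
    have hdiv : (m &&& k) / 2 = (m / 2) &&& (k / 2) := Nat.and_div_two
    have hd2 : (m / 2) &&& (k / 2) ≤ m / 2 := Nat.and_le_left
    have hsub : (m - (m &&& k)) / 2 = m / 2 - ((m / 2) &&& (k / 2)) := by omega
    rw [Nat.testBit_succ, hsub, ih (m / 2) (k / 2),
        Nat.testBit_div_two, Nat.testBit_div_two]

theorem tb_ofNat (n j : Nat) : (Int.ofNat n).testBit j = n.testBit j := rfl
theorem tb_negSucc (n j : Nat) : (Int.negSucc n).testBit j = !n.testBit j := rfl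
theorem tb_neg (x : Nat) (j : Nat) : (-(x:Int) - 1).testBit j = !(x.testBit j) := by
  rw [show -(x:Int) - 1 = Int.negSucc x by rw [Int.negSucc_eq]; ring]
  rfl
theorem pv_ofNat_nonneg (n : Nat) : (0:Int) ≤ Int.ofNat n := Int.natCast_nonneg n

theorem pv_testBit_bor (a b : Int) (j : Nat) :
    (PySem.Int.bor a b).testBit j = (a.testBit j || b.testBit j) := by
  rcases a with n | n <;> rcases b with m | m
  · have h : PySem.Int.bor (Int.ofNat n) (Int.ofNat m) = ((n ||| m : Nat) : Int) := by
      unfold PySem.Int.bor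
      rw [if_pos (pv_ofNat_nonneg n), if_pos (pv_ofNat_nonneg m)]
      rfl
    rw [h, tb_ofNat, tb_ofNat]
    exact Nat.testBit_or n m j
  · have h : PySem.Int.bor (Int.ofNat n) (Int.negSucc m) = -(↑(m - (m &&& n)) : Int) - 1 := by
      unfold PySem.Int.bor
      rw [if_pos (pv_ofNat_nonneg n), if_neg (by omega)]
      rw [show (-(Int.negSucc m) - 1).toNat = m from by omega]
      rfl
    rw [h, tb_neg, pv_sub_and_testBit, tb_ofNat, tb_negSucc]
    cases n.testBit j <;> cases m.testBit j <;> rfl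
  · have h : PySem.Int.bor (Int.negSucc n) (Int.ofNat m) = -(↑(n - (n &&& m)) : Int) - 1 := by
      unfold PySem.Int.bor
      rw [if_neg (by omega), if_pos (pv_ofNat_nonneg m)]
      rw [show (-(Int.negSucc n) - 1).toNat = n from by omega]
      rfl
    rw [h, tb_neg, pv_sub_and_testBit, tb_ofNat, tb_negSucc]
    cases n.testBit j <;> cases m.testBit j <;> rfl
  · have h : PySem.Int.bor (Int.negSucc n) (Int.negSucc m) = -(↑(n &&& m) : Int) - 1 := by
      unfold PySem.Int.bor
      rw [if_neg (by omega), if_neg (by omega)]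
      rw [show (-(Int.negSucc n) - 1).toNat = n from by omega,
          show (-(Int.negSucc m) - 1).toNat = m from by omega]
    rw [h, tb_neg, tb_negSucc, tb_negSucc, Nat.testBit_and]
    cases n.testBit j <;> cases m.testBit j <;> rfl

theorem pv_band_mask (a : Int) (c : Nat) :
    ∃ n : Nat, PySem.Int.band a ((2 : Int) ^ c - 1) = (n : Int) ∧ n < 2 ^ c ∧
      ∀ j : Nat, n.testBit j = (a.testBit j && decide (j < c)) := by
  have hm : ((2 ^ c - 1 : Nat) : Int) = (2 : Int) ^ c - 1 := by
    have := Nat.one_le_two_pow (n := c)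
    push_cast [this]
    ring
  have hpos : 2 ^ c - 1 < 2 ^ c := by
    have := Nat.one_le_two_pow (n := c); omega
  rcases a with n | n
  · refine ⟨n &&& (2 ^ c - 1), ?_, ?_, ?_⟩
    · rw [← hm]
      unfold PySem.Int.band
      rw [if_pos (pv_ofNat_nonneg n), if_pos (Int.natCast_nonneg _)]
      rw [Int.toNat_natCast]
      rfl
    · exact Nat.lt_of_le_of_lt Nat.and_le_right hpos
    · intro j
      rw [Nat.testBit_and, Nat.testBit_two_pow_sub_one, tb_ofNat]
  · refine ⟨(2 ^ c - 1) - ((2 ^ c - 1) &&& n), ?_, ?_, ?_⟩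
    · rw [← hm]
      unfold PySem.Int.band
      rw [if_neg (by omega), if_pos (Int.natCast_nonneg _)]
      rw [show (-(Int.negSucc n) - 1).toNat = n from by omega, Int.toNat_natCast]
    · omega
    · intro j
      rw [pv_sub_and_testBit, Nat.testBit_two_pow_sub_one, tb_negSucc]
      cases n.testBit j <;> cases (decide (j < c)) <;> rfl

theorem pv_testBit_shr (a : Int) (k j : Nat) : (a >>> k).testBit j = a.testBit (k + j) := by
  rcases a with n | n
  · show (Int.ofNat (n >>> k)).testBit j = _
    rw [tb_ofNat, tb_ofNat, Nat.testBit_shiftRight]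
  · show (Int.negSucc (n >>> k)).testBit j = _
    rw [tb_negSucc, tb_negSucc, Nat.testBit_shiftRight]

theorem pv_testBit_shl1 (a : Int) (j : Nat) :
    (a <<< (1 : Nat)).testBit j = (decide (0 < j) && a.testBit (j - 1)) := by
  rcases a with n | n
  · show (Int.ofNat (n <<< 1)).testBit j = _
    rw [tb_ofNat, tb_ofNat, Nat.testBit_shiftLeft]
    cases j with
    | zero => rfl
    | succ j => simp
  · show (Int.negSucc ((n + 1) <<< 1 - 1)).testBit j = _
    rw [tb_negSucc, tb_negSucc]
    have h : (n + 1) <<< 1 - 1 = 2 * n + 1 := by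
      rw [Nat.shiftLeft_eq]; omega
    rw [h]
    cases j with
    | zero =>
      rw [Nat.testBit_zero]
      simp
    | succ j =>
      rw [Nat.testBit_succ, show (2 * n + 1) / 2 = n from by omega]
      simp

theorem pv_tb0_mod (x : Int) : (PySem.Int.mod x 2 == 1) = x.testBit 0 := by
  rw [Bool.eq_iff_iff, beq_iff_eq]
  unfold PySem.Int.mod
  rw [Int.fmod_eq_emod, if_pos (Or.inl (by norm_num)), add_zero]
  rcases x with n | n
  · rw [tb_ofNat, Nat.testBit_zero]
    rw [show Int.ofNat n = (n : Int) from rfl]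
    simp only [decide_eq_true_eq]
    omega
  · rw [tb_negSucc, Nat.testBit_zero]
    rw [Int.negSucc_eq]
    simp only [Bool.not_eq_true', decide_eq_false_iff_not]
    omega

theorem pv_testBit_shr0 (a : Int) (j : Nat) : (a >>> j).testBit 0 = a.testBit j := by
  rw [pv_testBit_shr, Nat.add_zero]

-- "(x >> j) & 1 == 1" reads exactly bit j
theorem pv_bit1 (x : Int) (j : Nat) :
    (PySem.Int.band (x >>> j) 1 == 1) = x.testBit j := by
  rw [PySem.Int.band_one, pv_tb0_mod, pv_testBit_shr0]

theorem pv_testBit_one (j : Nat) : Nat.testBit 1 j = decide (j = 0) := by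
  cases j with
  | zero => rfl
  | succ j =>
    rw [Nat.testBit_succ, show (1 : Nat) / 2 = 0 from by omega, Nat.zero_testBit]
    simp

theorem pv_shl_cast (n k : Nat) : ((n : Int) <<< k) = ((n <<< k : Nat) : Int) := rfl

-- pvPack of a 0/1 list is the Nat whose bit j is entry j
theorem pv_pack : ∀ (N : Nat) (bs : List Int), bs.length ≤ N → (∀ x ∈ bs, x = 0 ∨ x = 1) →
    ∃ n : Nat, pvPack bs = (n : Int) ∧ n < 2 ^ bs.length ∧
      ∀ j : Nat, n.testBit j = decide (bs.getD j 0 = 1) := by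
  intro N
  induction N with
  | zero =>
    intro bs hN _
    have hnil : bs = [] := List.eq_nil_of_length_eq_zero (by omega)
    subst hnil
    refine ⟨0, by rw [pvPack]; rfl, by norm_num, ?_⟩
    intro j
    rw [Nat.zero_testBit]
    simp
  | succ N ih =>
    intro bs hN hb
    by_cases h0 : bs = []
    · subst h0
      refine ⟨0, by rw [pvPack]; rfl, by norm_num, ?_⟩
      intro j
      rw [Nat.zero_testBit]
      simp
    · by_cases h1 : bs.length = 1
      · obtain ⟨b, hbs⟩ : ∃ b, bs = [b] := by
          rcases bs with _ | ⟨b, rest⟩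
          · exact absurd rfl h0
          · exact ⟨b, by simp at h1; rw [h1]⟩
        subst hbs
        rcases hb b List.mem_cons_self with hv | hv <;> subst hv
        · refine ⟨0, by rw [pvPack]; rfl, by norm_num, ?_⟩
          intro j
          rw [Nat.zero_testBit]
          cases j <;> simp
        · refine ⟨1, by rw [pvPack]; rfl, by norm_num, ?_⟩
          intro j
          rw [pv_testBit_one]
          cases j <;> simp
      · have hlen2 : 2 ≤ bs.length := by
          have h1' : bs.length ≠ 1 := h1
          have := List.length_pos_of_ne_nil h0
          omega
        have hhd : 1 ≤ bs.length / 2 ∧ bs.length / 2 < bs.length := by omega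
        obtain ⟨nl, hl, hllt, hltb⟩ := ih (bs.take (bs.length / 2))
          (by rw [List.length_take, Nat.min_eq_left (Nat.div_le_self _ _)]; omega)
          (fun x hx => hb x (List.mem_of_mem_take hx))
        obtain ⟨nh, hh, hhlt, hhtb⟩ := ih (bs.drop (bs.length / 2))
          (by rw [List.length_drop]; omega)
          (fun x hx => hb x (List.mem_of_mem_drop hx))
        rw [List.length_take, Nat.min_eq_left (by omega)] at hllt
        rw [List.length_drop] at hhlt
        refine ⟨nl ||| (nh <<< (bs.length / 2)), ?_, ?_, ?_⟩
        · rw [pvPack, dif_neg h0, dif_neg h1, hl, hh, pv_shl_cast, PySem.Int.bor_natCast]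
        · apply Nat.or_lt_two_pow
          · exact Nat.lt_of_lt_of_le hllt (Nat.pow_le_pow_right (by norm_num) (by omega))
          · rw [Nat.shiftLeft_eq]
            calc nh * 2 ^ (bs.length / 2)
                < 2 ^ (bs.length - bs.length / 2) * 2 ^ (bs.length / 2) := by
                  exact (Nat.mul_lt_mul_right (Nat.two_pow_pos _)).mpr hhlt
              _ = 2 ^ bs.length := by
                  rw [← Nat.pow_add]
                  congr 1
                  omega
        · intro j
          rw [Nat.testBit_or, hltb j, Nat.testBit_shiftLeft]
          by_cases hj : j < bs.length / 2
          · rw [List.getD_eq_getElem?_getD, List.getD_eq_getElem?_getD, List.getElem?_take,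
                if_pos hj]
            have : ¬(j ≥ bs.length / 2) := by omega
            simp [this]
          · have hge : j ≥ bs.length / 2 := by omega
            rw [hhtb (j - bs.length / 2)]
            simp only [List.getD_eq_getElem?_getD, List.getElem?_take, List.getElem?_drop,
              if_neg (show ¬ j < bs.length / 2 from by omega)]
            rw [show bs.length / 2 + (j - bs.length / 2) = j from by omega]
            simp [hge]

-- A's index-setting fold over a zero-filled suffix is a map
theorem pv_setfold (h : Int → Int → Int) :
    ∀ (d a : Nat) (ex : List Int), ex.length = a + d →
      (∀ m : Nat, a ≤ m → m < a + d → ex[m]? = some 0) →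
      (PySem.List.pyRange (a : Int) ((a : Int) + (d : Int)) 1).foldl
        (fun ex i => PySem.List.pySetD ex i (h (PySem.List.pyGetD ex i 0) i)) ex
      = ex.take a ++ (List.range d).map (fun k : Nat => h 0 ((a : Int) + (k : Int))) := by
  intro d
  induction d with
  | zero =>
    intro a ex hlen _
    rw [show (a : Int) + ((0 : Nat) : Int) = (a : Int) by push_cast; ring,
        PySem.List.pyRange_one_eq_nil (le_refl _)]
    simp only [List.foldl_nil, List.range_zero, List.map_nil, List.append_nil]
    rw [show a = ex.length from by omega, List.take_length]
  | succ d ih =>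
    intro a ex hlen hz
    have hlt : (a : Int) < (a : Int) + ((d + 1 : Nat) : Int) := by push_cast; omega
    rw [PySem.List.pyRange_one_cons hlt]
    simp only [List.foldl_cons]
    have ha : a < ex.length := by omega
    have hget : PySem.List.pyGetD ex ((a : Nat) : Int) 0 = 0 := by
      rw [PySem.List.pyGetD_natCast]
      have := hz a (le_refl a) (by omega)
      rw [List.getD_eq_getElem?_getD, this]
      rfl
    rw [hget, PySem.List.pySetD_natCast]
    have hre : (a : Int) + 1 = ((a + 1 : Nat) : Int) := by push_cast; ring
    have hre2 : (a : Int) + ((d + 1 : Nat) : Int) = ((a + 1 : Nat) : Int) + ((d : Nat) : Int) := by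
      push_cast; ring
    rw [hre, hre2, ih (a + 1) (ex.set a (h 0 ((a : Nat) : Int)))
      (by rw [List.length_set]; omega)
      (by
        intro m hm1 hm2
        rw [List.getElem?_set_ne (by omega)]
        exact hz m (by omega) (by omega))]
    have hv1 : (ex.set a (h 0 ((a : Nat) : Int))).take (a + 1)
        = ex.take a ++ [h 0 ((a : Nat) : Int)] := by
      rw [List.take_set, List.take_add_one, List.getElem?_eq_getElem ha]
      simp only [Option.toList_some]
      rw [List.set_append]
      rw [if_neg (by rw [List.length_take]; omega)]
      rw [show a - (ex.take a).length = 0 from by rw [List.length_take]; omega]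
      rfl
    have hv2 : (List.range (d + 1)).map (fun k : Nat => h 0 (((a : Nat) : Int) + (k : Int)))
        = h 0 ((a : Nat) : Int)
          :: (List.range d).map (fun k : Nat => h 0 (((a + 1 : Nat) : Int) + (k : Int))) := by
      rw [List.range_succ_eq_map, List.map_cons, List.map_map]
      congr 1
      apply List.map_congr_left
      intro k _
      simp only [Function.comp_apply]
      congr 1
      push_cast
      ring
    rw [hv1, hv2, List.append_assoc, List.singleton_append]

-- per-row value of A's loop body (e0 = 0, the cell read before any write)
def pvRowA (field : List Int) (rows : Int) (cols : Int) (i : Int) : Int :=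
  let e1 := PySem.Int.bor 0 (PySem.List.pyGetD field i 0)
  let e2 := if 0 < i then PySem.Int.bor e1 (PySem.List.pyGetD field (i - 1) 0) else e1
  let e3 := if i < rows - 1 then PySem.Int.bor e2 (PySem.List.pyGetD field (i + 1) 0) else e2
  let e4 := PySem.Int.bor e3 ((PySem.List.pyGetD field i 0) <<< (1 : Nat))
  let e5 := PySem.Int.bor e4 ((PySem.List.pyGetD field i 0) >>> (1 : Nat))
  let e6 := PySem.Int.band e5 ((2 : Int) ^ cols.toNat - 1)
  PySem.Int.bxor e6 ((2 : Int) ^ cols.toNat - 1)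

-- per-row value of B's loop body
def pvRowB (field : List Int) (rows : Int) (cols : Int) (i : Int) : Int :=
  pvPack ((PySem.List.pyRange 0 cols 1).foldl
    (fun surv j =>
      surv ++ [if (PySem.Int.band ((PySem.List.pyGetD field i 0) >>> j.toNat) 1 == 1)
        || (PySem.Int.band ((if 0 < i then PySem.List.pyGetD field (i - 1) 0 else 0) >>> j.toNat) 1 == 1)
        || (PySem.Int.band ((if i < rows - 1 then PySem.List.pyGetD field (i + 1) 0 else 0) >>> j.toNat) 1 == 1)
        || (decide (0 < j) && (PySem.Int.band ((PySem.List.pyGetD field i 0) >>> (j - 1).toNat) 1 == 1))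
        || (PySem.Int.band ((PySem.List.pyGetD field i 0) >>> (j + 1).toNat) 1 == 1)
        then (0 : Int) else 1])
    [])

theorem pv_A_as_map (field : List Int) (rows cols : Int) (r : Nat) (hr : rows = (r : Int)) :
    plant_explode field rows cols
      = (List.range r).map (fun k : Nat => pvRowA field rows cols ((k : Nat) : Int)) := by
  unfold plant_explode
  rw [show PySem.List.pyRange 0 rows 1
        = PySem.List.pyRange ((0 : Nat) : Int) (((0 : Nat) : Int) + ((r : Nat) : Int)) 1 from by
      rw [hr]; norm_num,
      show rows.toNat = r from by omega]
  have h := pv_setfold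
    (fun e0 i =>
      let e1 := PySem.Int.bor e0 (PySem.List.pyGetD field i 0)
      let e2 := if 0 < i then PySem.Int.bor e1 (PySem.List.pyGetD field (i - 1) 0) else e1
      let e3 := if i < rows - 1 then PySem.Int.bor e2 (PySem.List.pyGetD field (i + 1) 0) else e2
      let e4 := PySem.Int.bor e3 ((PySem.List.pyGetD field i 0) <<< (1 : Nat))
      let e5 := PySem.Int.bor e4 ((PySem.List.pyGetD field i 0) >>> (1 : Nat))
      let e6 := PySem.Int.band e5 ((2 : Int) ^ cols.toNat - 1)
      PySem.Int.bxor e6 ((2 : Int) ^ cols.toNat - 1))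
    r 0 (List.replicate r 0) (by simp)
    (by intro m h1 h2; simp only [List.getElem?_replicate]; rw [if_pos (by omega)])
  refine h.trans ?_
  simp only [List.take_zero, List.nil_append]
  apply List.map_congr_left
  intro k _
  show pvRowA field rows cols (((0 : Nat) : Int) + ((k : Nat) : Int)) = _
  congr 1
  push_cast
  ring

theorem pv_B_as_map (field : List Int) (rows cols : Int) (r : Nat) (hr : rows = (r : Int)) :
    plant_explode_alt field rows cols
      = (List.range r).map (fun k : Nat => pvRowB field rows cols ((k : Nat) : Int)) := by
  unfold plant_explode_alt
  have h := PySem.List.foldl_append_eq_flatMap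
    (fun i : Int => [pvRowB field rows cols i]) (PySem.List.pyRange 0 rows 1) []
  refine h.trans ?_
  rw [List.nil_append, ← List.map_eq_flatMap, PySem.List.pyRange_one]
  rw [show (rows - 0).toNat = r from by omega, List.map_map]
  apply List.map_congr_left
  intro k _
  simp only [Function.comp_apply]
  congr 1
  omega

theorem pv_row_eq (field : List Int) (rows : Int) (cols : Int) (c : Nat) (hc : cols = (c : Int))
    (i : Int) :
    pvRowA field rows cols i = pvRowB field rows cols i := by
  subst hc
  simp only [pvRowA, pvRowB]
  rw [Int.toNat_natCast]
  have hm : ((2 ^ c - 1 : Nat) : Int) = (2 : Int) ^ c - 1 := by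
    have := Nat.one_le_two_pow (n := c)
    push_cast [this]
    ring
  obtain ⟨n1, hb, hn1, hbit⟩ := pv_band_mask
    (PySem.Int.bor
      (PySem.Int.bor
        (if (i : Int) < rows - 1 then
          PySem.Int.bor
            (if 0 < i then
              PySem.Int.bor (PySem.Int.bor 0 (PySem.List.pyGetD field i 0))
                (PySem.List.pyGetD field (i - 1) 0)
             else PySem.Int.bor 0 (PySem.List.pyGetD field i 0))
            (PySem.List.pyGetD field (i + 1) 0)
         else
          (if 0 < i then
            PySem.Int.bor (PySem.Int.bor 0 (PySem.List.pyGetD field i 0))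
              (PySem.List.pyGetD field (i - 1) 0)
           else PySem.Int.bor 0 (PySem.List.pyGetD field i 0)))
        ((PySem.List.pyGetD field i 0) <<< (1 : Nat)))
      ((PySem.List.pyGetD field i 0) >>> (1 : Nat))) c
  rw [hb, ← hm, PySem.Int.bxor_natCast]
  -- B side: the appending fold is a map
  have hsurv := PySem.List.foldl_append_eq_flatMap
    (fun j : Int =>
      [if (PySem.Int.band ((PySem.List.pyGetD field i 0) >>> ((j.toNat : Int))) 1 == 1)
        || (PySem.Int.band ((if 0 < i then PySem.List.pyGetD field (i - 1) 0 else 0) >>> ((j.toNat : Int))) 1 == 1)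
        || (PySem.Int.band ((if i < rows - 1 then PySem.List.pyGetD field (i + 1) 0 else 0) >>> ((j.toNat : Int))) 1 == 1)
        || (decide (0 < j) && (PySem.Int.band ((PySem.List.pyGetD field i 0) >>> (((j - 1).toNat : Int))) 1 == 1))
        || (PySem.Int.band ((PySem.List.pyGetD field i 0) >>> (((j + 1).toNat : Int))) 1 == 1)
        then (0 : Int) else 1])
    (PySem.List.pyRange 0 (c : Int) 1) []
  rw [List.nil_append, ← List.map_eq_flatMap] at hsurv
  rw [hsurv]
  set g : Int → Bool := fun j =>
    (PySem.Int.band ((PySem.List.pyGetD field i 0) >>> ((j.toNat : Int))) 1 == 1)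
      || (PySem.Int.band ((if 0 < i then PySem.List.pyGetD field (i - 1) 0 else 0) >>> ((j.toNat : Int))) 1 == 1)
      || (PySem.Int.band ((if i < rows - 1 then PySem.List.pyGetD field (i + 1) 0 else 0) >>> ((j.toNat : Int))) 1 == 1)
      || (decide (0 < j) && (PySem.Int.band ((PySem.List.pyGetD field i 0) >>> (((j - 1).toNat : Int))) 1 == 1))
      || (PySem.Int.band ((PySem.List.pyGetD field i 0) >>> (((j + 1).toNat : Int))) 1 == 1)
    with hg
  have hlenm : ((PySem.List.pyRange 0 (c : Int) 1).map
      (fun j => if g j then (0 : Int) else 1)).length = c := by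
    rw [List.length_map, PySem.List.length_pyRange_one]
    omega
  obtain ⟨n2, hp, hlt2, htb2⟩ := pv_pack c
    ((PySem.List.pyRange 0 (c : Int) 1).map (fun j => if g j then (0 : Int) else 1))
    (by rw [hlenm])
    (by
      intro x hx
      rw [List.mem_map] at hx
      obtain ⟨j, _, hj⟩ := hx
      by_cases hgj : g j
      · rw [← hj, if_pos hgj]; left; rfl
      · rw [← hj, if_neg hgj]; right; rfl)
  rw [hp]
  congr 1
  rw [hlenm] at hlt2
  apply Nat.eq_of_testBit_eq
  intro j
  rw [Nat.testBit_xor, hbit j, Nat.testBit_two_pow_sub_one, htb2 j]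
  by_cases hj : j < c
  · simp only [hj, decide_true, Bool.and_true, Bool.xor_true]
    rw [List.getD_eq_getElem?_getD, PySem.List.getElem?_map_pyRange_zero _ c j hj]
    have hval : ∀ b : Bool, (decide ((Option.getD (some (if b then (0:Int) else 1)) 0) = 1)) = !b := by
      intro b; cases b <;> simp
    rw [hval (g ((j : Nat) : Int))]
    congr 1
    rw [hg]
    simp only [Int.shiftRight_natCast_right, pv_bit1, Int.toNat_natCast,
      apply_ite (fun x : Int => x.testBit j),
      show (((j : Nat) : Int) - 1).toNat = j - 1 from by omega,
      show (((j : Nat) : Int) + 1).toNat = j + 1 from by omega,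
      show (1 + j) = j + 1 from by omega,
      show decide (0 < ((j : Nat) : Int)) = decide (0 < j) from by simp,
      pv_testBit_bor, pv_testBit_shl1, pv_testBit_shr,
      show (0:Int).testBit j = false from by
        rw [show (0:Int) = Int.ofNat 0 from rfl, tb_ofNat]; exact Nat.zero_testBit j,
      Bool.false_or]
    by_cases h1 : 0 < i <;> by_cases h2 : i < rows - 1 <;> simp [h1, h2]
  · simp only [hj, decide_false, Bool.and_false, Bool.xor_false]
    rw [List.getD_eq_getElem?_getD, List.getElem?_eq_none (by rw [hlenm]; omega)]
    simp

-- ===== VERDICT (by name: the statement is the Claim_ definition above) =====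
theorem plant_explode_spec : Claim_equal_plant_explode := by
  intro field rows cols _ hpre
  unfold Pre_plant_explode at hpre
  unfold Spec_plant_explode
  by_cases hrow : rows ≤ 0
  · unfold plant_explode plant_explode_alt
    rw [PySem.List.pyRange_one_eq_nil hrow]
    simp [Int.toNat_of_nonpos hrow]
  · obtain ⟨hc, _⟩ := hpre (by omega)
    have hr : rows = ((rows.toNat : Nat) : Int) := by omega
    rw [pv_A_as_map field rows cols rows.toNat hr,
        pv_B_as_map field rows cols rows.toNat hr]
    apply List.map_congr_left
    intro k _
    exact pv_row_eq field rows cols cols.toNat (by omega) _
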